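-- pv_equiv track=rewrite | github.com/damianleng/Group-3-DES-AES | AES_module/AES2.py | inverse_matrix_multiplication
-- ===== SOURCE A (Python) =====
-- def add(A, B):
--     # make sure A, B have the same length
--     while len(A) > len(B):
--         B = '0' + B
--     while len(B) > len(A):
--         A = '0' + A
--     C = ''
--     for i in range(len(A)):
--         if A[i] == B[i]:
--             C += '0'
--         else:
--             C+= '1'
--     # Get rid of zeros in front of C
--     i = 0
--     while i<len(C) and C[i] == '0':
--         i += 1
--     if i == len(C):
--         C = '0' # all 0s
--     else:
--         C = C[i:]
--     return C
--
-- def multiply(A, B):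
--     C = '0' # result
--     for i in range(len(B)-1, -1, -1):
--         if B[i] == '1':
--             C = add(C, A)
--         A = A + '0'
--     return C
--
-- def mod(A, P):
--     # 101110 substr -> 10111 then add 10111 + P, then addpend it to the leftover substr
--     # use substr, then add it, and then append it to the leftover substr
--     result = A
--     while len(result) >= len(P):
--         left = add(result[:len(P)], P)
--         right = result[len(P):]
--         result = left + right
--     return result
--
-- def inverse_matrix_multiplication(column):
--     nine = "00001001"
--     b = "00001011"
--     d = "00001101"
--     e = "00001110"
--     GF = "100011011"
--     MATRIX = [[e, b, d, nine], [nine, e, b, d], [d, nine, e, b], [b, d, nine, e]]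
--
--     result = []
--     for i in range(4):
--         total = "00000000"
--         for j in range(4):
--             multiplied = mod(multiply(MATRIX[i][j], column[j]), GF)
--             total = add(total, multiplied)
--         result.append(total)
--     return result
-- ===== SOURCE B (Python) =====
-- # B: single fused Horner scan per column string with interleaved reduction,
-- # instead of A's staged string pipeline (multiply building a full-width product,
-- # then polynomial long division, then string add).
--
-- _RED = 0x11B
-- _MATRIX = ((14, 11, 13, 9),
--            (9, 14, 11, 13),
--            (13, 9, 14, 11),
--            (11, 13, 9, 14))
--
-- def _xtime(a):
--     a <<= 1
--     return a ^ _RED if a & 0x100 else a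
--
-- def _mul_str(c, s):
--     # Horner over the string's bits, MSB first; reduction fused into each step,
--     # so no full-width product is ever formed.
--     acc = 0
--     for ch in s:
--         acc = _xtime(acc)
--         if ch == '1':
--             acc ^= c
--     return acc
--
-- def inverse_matrix_multiplication(column):
--     result = []
--     for row in _MATRIX:
--         total = 0
--         for c, s in zip(row, column):
--             total ^= _mul_str(c, s)
--         result.append(bin(total)[2:])
--     return result
-- ===== Notes on version B (the rewrite author's own statement) =====
-- stated objective: alternative
-- what changed: Replaces A's three-stage string pipeline per matrix entry (shift-and-add multiply building a full-width product string, then polynomial long division mod the AES polynomial, then string XOR-add into the row total) with a single fused Horner scan over each column string: one pass per character doing xtime (shift + conditional XOR 0x11B) and a conditional XOR of the small matrix constant, so no full-width product or separate reduction loop ever exists; rows XOR-accumulate machine ints rendered with bin(total)[2:].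
import Mathlib
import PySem

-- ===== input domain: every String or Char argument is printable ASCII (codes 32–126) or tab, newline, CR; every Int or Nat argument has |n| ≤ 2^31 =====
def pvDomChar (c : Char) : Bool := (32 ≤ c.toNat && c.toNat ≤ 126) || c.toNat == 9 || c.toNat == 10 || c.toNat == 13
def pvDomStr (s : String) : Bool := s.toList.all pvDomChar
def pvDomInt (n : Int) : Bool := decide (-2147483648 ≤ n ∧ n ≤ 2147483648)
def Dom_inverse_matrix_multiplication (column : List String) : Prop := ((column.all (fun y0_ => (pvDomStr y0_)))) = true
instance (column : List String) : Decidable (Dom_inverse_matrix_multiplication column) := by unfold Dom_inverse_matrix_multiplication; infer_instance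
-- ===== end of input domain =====

-- B replaces A's staged binary-string pipeline (shift-add multiply to a full-width
-- product, then polynomial long division, then string add) with one fused Horner scan
-- per column string (xtime + conditional XOR per character), rendering rows with bin(v)[2:].


-- ===== PORT A =====
-- while len(A) > len(B): B = '0' + B
def pvPadTo (la : Nat) (B : List Char) : List Char :=
  if la > B.length then pvPadTo la ('0' :: B) else B
termination_by la - B.length
decreasing_by simp; omega

-- trailing strip loop of add: skip leading '0's, '0' if all zeros
def pvStrip : List Char → List Char
  | [] => ['0']
  | c :: t => if c = '0' then pvStrip t else c :: t

def pvAdd (A B : List Char) : List Char :=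
  let B' := pvPadTo A.length B
  let A' := pvPadTo B'.length A
  let C := (List.range A'.length).foldl
    (fun C i => C ++ [if A'.getD i ' ' = B'.getD i ' ' then '0' else '1']) []
  pvStrip C

-- for i in range(len(B)-1,-1,-1): visit B's characters from the right; state (C, A)
def pvMultiply (A B : List Char) : List Char :=
  (B.reverse.foldl (fun (s : List Char × List Char) c =>
      (if c = '1' then pvAdd s.1 s.2 else s.1, s.2 ++ ['0'])) (['0'], A)).1

-- the while loop of mod, with fuel (Python's loop shrinks the string every two
-- iterations, so fuel 2*len+2 is never exhausted on the call below)
def pvModGo : Nat → List Char → List Char → List Char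
  | 0, result, _ => result
  | fuel + 1, result, P =>
    if result.length ≥ P.length then
      pvModGo fuel (pvAdd (result.take P.length) P ++ result.drop P.length) P
    else result

def pvMod (A P : List Char) : List Char := pvModGo (2 * A.length + 2) A P

def pvGFstr : List Char := ['1','0','0','0','1','1','0','1','1']

def pvMATRIXstr : List (List (List Char)) :=
  let nine := ['0','0','0','0','1','0','0','1']
  let b := ['0','0','0','0','1','0','1','1']
  let d := ['0','0','0','0','1','1','0','1']
  let e := ['0','0','0','0','1','1','1','0']
  [[e, b, d, nine], [nine, e, b, d], [d, nine, e, b], [b, d, nine, e]]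

def inverse_matrix_multiplication (column : List String) : List String :=
  (List.range 4).foldl (fun result i =>
    result ++ [String.mk ((List.range 4).foldl (fun total j =>
      pvAdd total (pvMod (pvMultiply ((pvMATRIXstr.getD i []).getD j [])
                                     ((column.getD j "").toList)) pvGFstr))
      ['0','0','0','0','0','0','0','0'])]) []

-- ===== PORT B =====
def pvXtime (a : Nat) : Nat :=
  let t := a <<< 1
  if t &&& 256 ≠ 0 then t ^^^ 283 else t

-- Horner scan over the string, reduction fused into each step
def pvMulStr (c : Nat) (s : List Char) : Nat :=
  s.foldl (fun acc ch =>
    let t := pvXtime acc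
    if ch = '1' then t ^^^ c else t) 0

def pvMATRIXn : List (List Nat) :=
  [[14, 11, 13, 9], [9, 14, 11, 13], [13, 9, 14, 11], [11, 13, 9, 14]]

-- bin(n)[2:]
def pvToBinAux : Nat → List Char
  | 0 => []
  | n + 1 => pvToBinAux ((n + 1) / 2) ++ [if (n + 1) % 2 = 1 then '1' else '0']
decreasing_by simp; omega

def pvToBin (n : Nat) : List Char := if n = 0 then ['0'] else pvToBinAux n

def inverse_matrix_multiplication_alt (column : List String) : List String :=
  pvMATRIXn.foldl (fun result row =>
    result ++ [String.mk (pvToBin ((row.zip column).foldl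
      (fun t cs => t ^^^ pvMulStr cs.1 cs.2.toList) 0))]) []

-- ===== PRECONDITION & SPEC =====
-- A indexes column[0..3]; on a shorter list Python raises IndexError.
def Pre_inverse_matrix_multiplication (column : List String) : Prop := 4 ≤ column.length
instance (column : List String) : Decidable (Pre_inverse_matrix_multiplication column) := by
  unfold Pre_inverse_matrix_multiplication; infer_instance

def pvWitness_inverse_matrix_multiplication : List String := ["00000001", "10", "", "ab1"]

def Spec_inverse_matrix_multiplication (column : List String) (out : List String) : Prop := out = inverse_matrix_multiplication_alt column
instance (column : List String) (out : List String) : Decidable (Spec_inverse_matrix_multiplication column out) := by unfold Spec_inverse_matrix_multiplication; infer_instance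

-- ===== CLAIM (what is proved, stated in full; the proofs are below) =====
def Claim_equal_inverse_matrix_multiplication : Prop := ∀ (column : List String), Dom_inverse_matrix_multiplication column → Pre_inverse_matrix_multiplication column → Spec_inverse_matrix_multiplication column (inverse_matrix_multiplication column)

-- ===== LEMMAS AND PROOFS =====

-- value of a big-endian bit string: a character contributes 1 exactly when it is '1'
def pvBitc (c : Char) : Nat := if c = '1' then 1 else 0

def pvV (s : List Char) : Nat := s.foldl (fun v c => 2 * v + pvBitc c) 0

def pvIsBin (s : List Char) : Prop := ∀ c ∈ s, c = '0' ∨ c = '1'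

-- canonical (leading-zero-stripped) binary strings
def pvCanon (s : List Char) : Prop :=
  pvIsBin s ∧ (s = ['0'] ∨ ∃ t, s = '1' :: t)

-- reference carry-less multiplication
def pvClmul (a b : Nat) : Nat :=
  if b = 0 then 0 else (if b % 2 = 1 then a else 0) ^^^ pvClmul (2 * a) (b / 2)
termination_by b
decreasing_by omega

def pvBitLen (n : Nat) : Nat := if n = 0 then 0 else Nat.log2 n + 1

-- bit-level facts needed by pvReduceGo's decreasing_by
theorem tb_high {m x : Nat} (hx1 : 2 ^ m ≤ x) (hx2 : x < 2 ^ (m+1)) : x.testBit m = true := by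
  rw [Nat.testBit_eq_decide_div_mod_eq]
  have h2 : (2:Nat) ^ (m+1) = 2 ^ m + 2 ^ m := by ring
  have : x / 2 ^ m = 1 := by
    apply Nat.div_eq_of_lt_le
    · simpa using hx1
    · simp [Nat.succ_mul]; omega
  simp [this]

theorem pvXorTop {m x y : Nat} (hx1 : 2 ^ m ≤ x) (hx2 : x < 2 ^ (m + 1))
    (hy1 : 2 ^ m ≤ y) (hy2 : y < 2 ^ (m + 1)) : x ^^^ y < 2 ^ m := by
  have hlt : x ^^^ y < 2 ^ (m+1) := Nat.xor_lt_two_pow hx2 hy2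
  have htb : (x ^^^ y).testBit m = false := by
    simp [Nat.testBit_xor, tb_high hx1 hx2, tb_high hy1 hy2]
  rw [Nat.testBit_eq_decide_div_mod_eq] at htb
  have h2 : (2:Nat) ^ (m+1) = 2 ^ m + 2 ^ m := by ring
  have hd2 : (x ^^^ y) / 2 ^ m < 2 := by
    rw [Nat.div_lt_iff_lt_mul (by positivity)]; omega
  have hd0 : (x ^^^ y) / 2 ^ m = 0 := by
    simp only [decide_eq_false_iff_not] at htb
    generalize hq : (x ^^^ y) / 2 ^ m = q at htb hd2
    omega
  have := Nat.lt_of_div_eq_zero (by positivity) hd0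
  exact this

theorem pvBitLen_le_iff {n k : Nat} : pvBitLen n ≤ k ↔ n < 2 ^ k := by
  unfold pvBitLen
  by_cases h : n = 0
  · simp [h]
  · simp [h]
    constructor
    · intro hh; exact (Nat.log2_lt h).1 (by omega)
    · intro hh; have := (Nat.log2_lt h).2 hh; omega

theorem pvBitLen_bounds {n : Nat} (h : n ≠ 0) :
    2 ^ (pvBitLen n - 1) ≤ n ∧ n < 2 ^ pvBitLen n := by
  constructor
  · by_contra hc
    have : pvBitLen n ≤ pvBitLen n - 1 := pvBitLen_le_iff.2 (by omega)
    have h1 : 1 ≤ pvBitLen n := by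
      have : ¬ pvBitLen n ≤ 0 := fun hh => h (by simpa using pvBitLen_le_iff.1 hh)
      omega
    omega
  · exact pvBitLen_le_iff.1 le_rfl

theorem pvReduce_dec {p : Nat} (h : 9 ≤ pvBitLen p) :
    p ^^^ (283 <<< (pvBitLen p - 9)) < p := by
  have hp0 : p ≠ 0 := by rintro rfl; simp [pvBitLen] at h
  obtain ⟨h1, h2⟩ := pvBitLen_bounds hp0
  obtain ⟨m, hmb⟩ : ∃ m, pvBitLen p = m + 1 := ⟨pvBitLen p - 1, by omega⟩
  rw [hmb] at h1 h2 h ⊢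
  simp only [Nat.add_sub_cancel] at h1
  have hq : (283 : Nat) <<< (m + 1 - 9) = 283 * 2 ^ (m - 8) := by
    rw [Nat.shiftLeft_eq]; congr 2
  have hql : 2 ^ m ≤ 283 * 2 ^ (m - 8) := by
    calc 2 ^ m = 2 ^ 8 * 2 ^ (m - 8) := by rw [← pow_add]; congr 1; omega
    _ ≤ 283 * 2 ^ (m - 8) := by
          have hpos : (0:Nat) < 2 ^ (m-8) := by positivity
          nlinarith
  have hqh : 283 * 2 ^ (m - 8) < 2 ^ (m + 1) := by
    calc 283 * 2 ^ (m - 8) < 2 ^ 9 * 2 ^ (m - 8) := by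
          have hpos : (0:Nat) < 2 ^ (m-8) := by positivity
          nlinarith
    _ ≤ 2 ^ (m + 1) := by rw [← pow_add]; exact Nat.pow_le_pow_right Nat.zero_lt_two (by omega)
  have hxt := pvXorTop (x := p) (y := 283 * 2 ^ (m - 8)) h1 h2 hql hqh
  rw [hq]
  exact lt_of_lt_of_le hxt h1

-- reference long-division reduction (what A's mod loop computes on the value level)
def pvReduceGo (p : Nat) : Nat :=
  if h : pvBitLen p ≥ 9 then pvReduceGo (p ^^^ (283 <<< (pvBitLen p - 9))) else p
termination_by p
decreasing_by exact pvReduce_dec h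

theorem pvV_aux (a : Nat) (s : List Char) :
    s.foldl (fun v c => 2 * v + pvBitc c) a = a * 2 ^ s.length + pvV s := by
  induction s generalizing a with
  | nil => simp [pvV]
  | cons c t ih =>
    simp only [List.foldl_cons, List.length_cons, pvV]
    rw [ih (2 * a + pvBitc c), ih (2 * 0 + pvBitc c)]
    ring

theorem pvV_cons (c : Char) (t : List Char) :
    pvV (c :: t) = pvBitc c * 2 ^ t.length + pvV t := by
  show (c :: t).foldl (fun v c => 2 * v + pvBitc c) 0 = _
  simp only [List.foldl_cons]
  rw [pvV_aux]
  ring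

theorem pvV_append (A B : List Char) :
    pvV (A ++ B) = pvV A * 2 ^ B.length + pvV B := by
  show (A ++ B).foldl (fun v c => 2 * v + pvBitc c) 0 = _
  rw [List.foldl_append, pvV_aux]; rfl

theorem pvBitc_le (c : Char) : pvBitc c ≤ 1 := by
  unfold pvBitc; split <;> omega

theorem pvV_lt (s : List Char) : pvV s < 2 ^ s.length := by
  induction s with
  | nil => simp [pvV]
  | cons c t ih =>
    rw [pvV_cons]
    have := pvBitc_le c
    simp only [List.length_cons, pow_succ]
    nlinarith

-- the central disjoint-parts XOR lemma
theorem pvHLxor (x y u w n : Nat) (hu : u < 2 ^ n) (hw : w < 2 ^ n) :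
    (x * 2 ^ n + u) ^^^ (y * 2 ^ n + w) = (x ^^^ y) * 2 ^ n + (u ^^^ w) := by
  have hx : x * 2 ^ n + u = 2 ^ n * x + u := by ring_nf
  have hy : y * 2 ^ n + w = 2 ^ n * y + w := by ring_nf
  have hz : (x ^^^ y) * 2 ^ n + (u ^^^ w) = 2 ^ n * (x ^^^ y) + (u ^^^ w) := by ring_nf
  rw [hx, hy, hz]
  apply Nat.eq_of_testBit_eq
  intro j
  rw [Nat.testBit_xor, Nat.testBit_two_pow_mul_add _ hu, Nat.testBit_two_pow_mul_add _ hw,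
    Nat.testBit_two_pow_mul_add _ (Nat.xor_lt_two_pow hu hw)]
  by_cases hj : j < n <;> simp [hj, Nat.testBit_xor]

theorem pvStrip_v (s : List Char) : pvV (pvStrip s) = pvV s := by
  induction s with
  | nil => rfl
  | cons c t ih =>
    unfold pvStrip
    split
    · rename_i hc
      rw [ih, pvV_cons, hc]
      rw [show pvBitc '0' = 0 from rfl]
      ring
    · rfl

theorem pvStrip_canon {s : List Char} (h : pvIsBin s) : pvCanon (pvStrip s) := by
  induction s with
  | nil =>
    refine ⟨?_, Or.inl rfl⟩
    intro c hc
    simp [pvStrip] at hc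
    simp [hc]
  | cons c t ih =>
    unfold pvStrip
    split
    · exact ih (fun x hx => h x (List.mem_cons_of_mem c hx))
    · rename_i hc
      rcases h c List.mem_cons_self with h0 | h1
      · exact absurd h0 hc
      · exact ⟨h, Or.inr ⟨t, by rw [h1]⟩⟩

theorem pvStrip_len (s : List Char) : (pvStrip s).length ≤ max 1 s.length := by
  induction s with
  | nil => simp [pvStrip]
  | cons c t ih =>
    unfold pvStrip
    split
    · simp only [List.length_cons]; omega
    · simp

theorem pvPadTo_eq (la : Nat) (B : List Char) :
    pvPadTo la B = List.replicate (la - B.length) '0' ++ B := by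
  by_cases h : la > B.length
  · rw [pvPadTo, if_pos h, pvPadTo_eq la ('0' :: B)]
    have hk : ∃ k, la - B.length = k + 1 := ⟨la - B.length - 1, by omega⟩
    obtain ⟨k, hk⟩ := hk
    rw [hk, show la - ('0' :: B).length = k by simp; omega]
    clear hk h
    induction k with
    | zero => simp
    | succ n ih => simp only [List.replicate_succ, List.cons_append, ih]
  · rw [pvPadTo, if_neg h, show la - B.length = 0 by omega]
    simp
termination_by la - B.length
decreasing_by simp; omega

theorem pvV_replicate (k : Nat) : pvV (List.replicate k '0') = 0 := by
  induction k with
  | zero => rfl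
  | succ n ih => rw [List.replicate_succ, pvV_cons, ih]; simp [pvBitc]

theorem pvPad_v (la : Nat) (B : List Char) : pvV (pvPadTo la B) = pvV B := by
  rw [pvPadTo_eq, pvV_append, pvV_replicate]; ring

theorem pvPad_len (la : Nat) (B : List Char) : (pvPadTo la B).length = max la B.length := by
  rw [pvPadTo_eq]; simp; omega

theorem pvPad_bin (la : Nat) {B : List Char} (hB : pvIsBin B) : pvIsBin (pvPadTo la B) := by
  rw [pvPadTo_eq]
  intro c hc
  rcases List.mem_append.1 hc with h | h
  · left; exact List.eq_of_mem_replicate h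
  · exact hB c h

def pvXorChar (a b : Char) : Char := if a = b then '0' else '1'

theorem pvRangeZip (A : List Char) : ∀ (B : List Char), A.length = B.length →
    (List.range A.length).map (fun i => if A.getD i ' ' = B.getD i ' ' then '0' else '1')
      = List.zipWith pvXorChar A B := by
  induction A with
  | nil => intro B h; simp
  | cons a t ih =>
    intro B h
    cases B with
    | nil => simp at h
    | cons b u =>
      simp only [List.length_cons, List.range_succ_eq_map, List.map_cons, List.map_map]
      simp only [List.zipWith_cons_cons, List.getD_cons_zero]
      congr 1
      have := ih u (by simpa using h)
      simpa using this

theorem pvBitc_xorChar {a b : Char} (ha : a = '0' ∨ a = '1') (hb : b = '0' ∨ b = '1') :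
    pvBitc (pvXorChar a b) = pvBitc a ^^^ pvBitc b := by
  rcases ha with rfl | rfl <;> rcases hb with rfl | rfl <;> decide

theorem pvZipXor : ∀ {A B : List Char}, pvIsBin A → pvIsBin B → A.length = B.length →
    pvV (List.zipWith pvXorChar A B) = pvV A ^^^ pvV B := by
  intro A
  induction A with
  | nil =>
    intro B _ _ h
    cases B with
    | nil => simp [pvV]
    | cons b u => simp at h
  | cons a t ih =>
    intro B hA hB h
    cases B with
    | nil => simp at h
    | cons b u =>
      have hlen : t.length = u.length := by simpa using h
      rw [List.zipWith_cons_cons, pvV_cons, pvV_cons, pvV_cons,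
        List.length_zipWith, hlen, min_self,
        ih (fun x hx => hA x (List.mem_cons_of_mem a hx))
           (fun x hx => hB x (List.mem_cons_of_mem b hx)) hlen,
        pvBitc_xorChar (hA a List.mem_cons_self) (hB b List.mem_cons_self)]
      exact (pvHLxor _ _ _ _ _ (hlen ▸ pvV_lt t) (pvV_lt u)).symm

theorem pvZip_bin (A B : List Char) : pvIsBin (List.zipWith pvXorChar A B) := by
  intro c hc
  induction A generalizing B with
  | nil => simp at hc
  | cons a t ih =>
    cases B with
    | nil => simp at hc
    | cons b u =>
      rw [List.zipWith_cons_cons] at hc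
      rcases List.mem_cons.1 hc with h | h
      · rw [h]; unfold pvXorChar; split <;> simp
      · exact ih u h

theorem pvAdd_zip (A B : List Char) :
    pvAdd A B = pvStrip (List.zipWith pvXorChar (pvPadTo (pvPadTo A.length B).length A)
                                                (pvPadTo A.length B)) := by
  unfold pvAdd
  dsimp only
  rw [PySem.List.foldl_append_singleton_eq_map,
    pvRangeZip _ _ (by simp [pvPad_len]), List.nil_append]

theorem pvAdd_v {A B : List Char} (hA : pvIsBin A) (hB : pvIsBin B) :
    pvV (pvAdd A B) = pvV A ^^^ pvV B := by
  rw [pvAdd_zip, pvStrip_v, pvZipXor (pvPad_bin _ hA) (pvPad_bin _ hB)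
    (by simp [pvPad_len]), pvPad_v, pvPad_v]

theorem pvAdd_canon {A B : List Char} (hA : pvIsBin A) (hB : pvIsBin B) :
    pvCanon (pvAdd A B) := by
  rw [pvAdd_zip]
  exact pvStrip_canon (pvZip_bin _ _)

theorem pvCanon_bin {s : List Char} (h : pvCanon s) : pvIsBin s := h.1

theorem pvToBinAux_eq {x : Nat} (h : x ≠ 0) :
    pvToBinAux x = pvToBinAux (x / 2) ++ [if x % 2 = 1 then '1' else '0'] := by
  cases x with
  | zero => exact absurd rfl h
  | succ n => rw [pvToBinAux]

theorem pvToBinAux_top : ∀ (t : List Char), pvIsBin t →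
    pvToBinAux (2 ^ t.length + pvV t) = '1' :: t := by
  intro t
  induction t using List.reverseRecOn with
  | nil =>
    intro _
    rw [show (2:Nat) ^ ([] : List Char).length + pvV [] = 1 from rfl,
      pvToBinAux_eq (by norm_num), show (1:Nat) / 2 = 0 from rfl,
      show pvToBinAux 0 = [] from by rw [pvToBinAux]]
    rfl
  | append_singleton t' c ih =>
    intro hbin
    have hb : pvBitc c ≤ 1 := pvBitc_le c
    have hx : 2 ^ (t' ++ [c]).length + pvV (t' ++ [c])
        = 2 * (2 ^ t'.length + pvV t') + pvBitc c := by
      rw [pvV_append, List.length_append]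
      simp [pvV_cons, pvV]
      ring
    rw [hx, pvToBinAux_eq (by positivity)]
    have h2 : (2 * (2 ^ t'.length + pvV t') + pvBitc c) / 2 = 2 ^ t'.length + pvV t' := by omega
    have h3 : (2 * (2 ^ t'.length + pvV t') + pvBitc c) % 2 = pvBitc c := by omega
    rw [h2, h3, ih (fun x hx => hbin x (List.mem_append_left _ hx))]
    have hc : c = '0' ∨ c = '1' := hbin c (List.mem_append_right _ List.mem_cons_self)
    rcases hc with rfl | rfl <;> simp [pvBitc]

theorem pvCanon_toBin {s : List Char} (h : pvCanon s) : pvToBin (pvV s) = s := by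
  rcases h with ⟨hbin, h0 | ⟨t, rfl⟩⟩
  · rw [h0]; rfl
  · have hbt : pvIsBin t := fun x hx => hbin x (List.mem_cons_of_mem _ hx)
    rw [pvV_cons, show pvBitc '1' = 1 from rfl, one_mul]
    unfold pvToBin
    rw [if_neg (by positivity), pvToBinAux_top t hbt]

-- w: value of the reversed (LSB-first) character list
def pvW : List Char → Nat
  | [] => 0
  | c :: t => pvBitc c + 2 * pvW t

theorem pvW_append_singleton (x : List Char) (c : Char) :
    pvW (x ++ [c]) = pvW x + 2 ^ x.length * pvBitc c := by
  induction x with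
  | nil => simp [pvW]
  | cons a t ih => simp [pvW, ih]; ring

theorem pvW_reverse (s : List Char) : pvW s.reverse = pvV s := by
  induction s with
  | nil => rfl
  | cons c t ih =>
    rw [List.reverse_cons, pvW_append_singleton, ih, pvV_cons, List.length_reverse]
    ring

theorem pvClmul_bit (a m : Nat) (c : Char) :
    pvClmul a (pvBitc c + 2 * m) = (if c = '1' then a else 0) ^^^ pvClmul (2 * a) m := by
  by_cases hc : c = '1'
  · have hb : pvBitc c = 1 := by simp [pvBitc, hc]
    rw [hb, pvClmul, if_neg (by omega), if_pos (by omega), hc]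
    simp [show (1 + 2 * m) / 2 = m by omega]
  · have hb : pvBitc c = 0 := by simp [pvBitc, hc]
    rw [hb, if_neg hc]
    by_cases hm : m = 0
    · subst hm; rw [pvClmul, pvClmul] <;> simp
    · rw [pvClmul, if_neg (by omega), if_neg (by omega)]
      simp [show (0 + 2 * m) / 2 = m by omega]

theorem pvMulLoop : ∀ (l : List Char) (C Ash : List Char), pvCanon C → pvIsBin Ash →
    pvCanon (l.foldl (fun (s : List Char × List Char) c =>
        (if c = '1' then pvAdd s.1 s.2 else s.1, s.2 ++ ['0'])) (C, Ash)).1 ∧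
    pvV (l.foldl (fun (s : List Char × List Char) c =>
        (if c = '1' then pvAdd s.1 s.2 else s.1, s.2 ++ ['0'])) (C, Ash)).1
      = pvV C ^^^ pvClmul (pvV Ash) (pvW l) := by
  intro l
  induction l with
  | nil =>
    intro C Ash hC hAsh
    refine ⟨hC, ?_⟩
    rw [show pvW [] = 0 from rfl, pvClmul, if_pos rfl]
    simp
  | cons c t ih =>
    intro C Ash hC hAsh
    rw [List.foldl_cons]
    have hAsh' : pvIsBin (Ash ++ ['0']) := by
      intro x hx
      rcases List.mem_append.1 hx with h | h
      · exact hAsh x h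
      · simp at h; simp [h]
    have hvAsh' : pvV (Ash ++ ['0']) = 2 * pvV Ash := by
      rw [pvV_append, show pvV ['0'] = 0 from rfl,
        show (['0'] : List Char).length = 1 from rfl]
      ring
    have hC' : pvCanon (if c = '1' then pvAdd C Ash else C) := by
      split
      · exact pvAdd_canon (pvCanon_bin hC) hAsh
      · exact hC
    obtain ⟨h1, h2⟩ := ih _ _ hC' hAsh'
    refine ⟨h1, ?_⟩
    rw [h2, hvAsh', show pvW (c :: t) = pvBitc c + 2 * pvW t from rfl, pvClmul_bit]
    by_cases hc : c = '1'
    · rw [if_pos hc, if_pos hc, pvAdd_v (pvCanon_bin hC) hAsh, Nat.xor_assoc]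
    · rw [if_neg hc, if_neg hc]
      simp

theorem pvMultiply_spec {A : List Char} (B : List Char) (hA : pvIsBin A) :
    pvCanon (pvMultiply A B) ∧ pvV (pvMultiply A B) = pvClmul (pvV A) (pvV B) := by
  unfold pvMultiply
  obtain ⟨h1, h2⟩ := pvMulLoop B.reverse ['0'] A ⟨fun x hx => by simp at hx; simp [hx], Or.inl rfl⟩ hA
  refine ⟨h1, ?_⟩
  rw [h2, pvW_reverse, show pvV ['0'] = 0 from rfl]
  simp

theorem pvGF_bin : pvIsBin pvGFstr := by
  intro c hc
  fin_cases hc <;> simp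

theorem pvBitLen_eq_of {n m : Nat} (h1 : 2 ^ m ≤ n) (h2 : n < 2 ^ (m + 1)) :
    pvBitLen n = m + 1 := by
  have ha : pvBitLen n ≤ m + 1 := pvBitLen_le_iff.2 h2
  have hb : ¬ pvBitLen n ≤ m := fun hh => absurd (pvBitLen_le_iff.1 hh) (by omega)
  omega

theorem pvQbounds (k : Nat) : 2 ^ (k + 8) ≤ 283 * 2 ^ k ∧ 283 * 2 ^ k < 2 ^ (k + 9) := by
  have hpos : (0:Nat) < 2 ^ k := by positivity
  constructor
  · rw [pow_add]; nlinarith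
  · rw [pow_add]; nlinarith

theorem pvModStep {result : List Char} (hb : pvIsBin result) (h9 : 9 ≤ result.length) :
    pvIsBin (pvAdd (result.take 9) pvGFstr ++ result.drop 9) ∧
    pvV (pvAdd (result.take 9) pvGFstr ++ result.drop 9)
      = pvV result ^^^ 283 * 2 ^ (result.length - 9) := by
  have htb : pvIsBin (result.take 9) := fun x hx => hb x (List.mem_of_mem_take hx)
  have hdb : pvIsBin (result.drop 9) := fun x hx => hb x (List.mem_of_mem_drop hx)
  have hdl : (result.drop 9).length = result.length - 9 := by simp
  constructor
  · intro x hx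
    rcases List.mem_append.1 hx with h | h
    · exact pvCanon_bin (pvAdd_canon htb pvGF_bin) x h
    · exact hdb x h
  · rw [pvV_append, pvAdd_v htb pvGF_bin, show pvV pvGFstr = 283 from rfl,
      show pvV result = pvV (result.take 9 ++ result.drop 9) by rw [List.take_append_drop],
      pvV_append, hdl]
    have := pvHLxor (pvV (result.take 9)) 283 (pvV (result.drop 9)) 0 (result.length - 9)
      (by rw [← hdl]; exact pvV_lt _) (by positivity)
    simp only [add_zero, Nat.xor_zero] at this
    rw [this]

theorem pvModGo_spec : ∀ (fuel : Nat) (result : List Char), pvIsBin result →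
    2 * result.length + (if result.head? = some '1' then 0 else 1) < fuel →
    pvIsBin (pvModGo fuel result pvGFstr) ∧
    pvV (pvModGo fuel result pvGFstr) = pvReduceGo (pvV result) := by
  intro fuel
  induction fuel with
  | zero => intro r _ h; exact absurd h (Nat.not_lt_zero _)
  | succ fuel ih =>
    intro result hbin hm
    rw [pvModGo]
    by_cases h9 : result.length ≥ pvGFstr.length
    swap
    · rw [if_neg h9]
      refine ⟨hbin, ?_⟩
      rw [pvReduceGo, dif_neg]
      rw [show pvGFstr.length = 9 from rfl] at h9
      intro hcon
      have : pvV result < 2 ^ 8 :=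
        lt_of_lt_of_le (pvV_lt result) (Nat.pow_le_pow_right Nat.zero_lt_two (by omega))
      exact absurd (pvBitLen_le_iff.2 this) (by omega)
    · rw [if_pos h9, show pvGFstr.length = 9 from rfl]
      rw [show pvGFstr.length = 9 from rfl] at h9
      obtain ⟨hbin', hval'⟩ := pvModStep hbin h9
      set result' := pvAdd (result.take 9) pvGFstr ++ result.drop 9 with hres'
      -- structure of the stripped left part
      cases result with
      | nil => simp at h9
      | cons r0 rest =>
      have hlen : (r0 :: rest).length = rest.length + 1 := rfl
      have hrl : 8 ≤ rest.length := by simp at h9; omega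
      have htake : (r0 :: rest).take 9 = r0 :: rest.take 8 := rfl
      have hzip : List.zipWith pvXorChar ((r0 :: rest).take 9) pvGFstr
          = pvXorChar r0 '1' :: List.zipWith pvXorChar (rest.take 8) (pvGFstr.tail) := rfl
      have hadd : pvAdd ((r0 :: rest).take 9) pvGFstr
          = pvStrip (pvXorChar r0 '1' :: List.zipWith pvXorChar (rest.take 8) (pvGFstr.tail)) := by
        rw [pvAdd_zip, pvPadTo_eq, pvPadTo_eq]
        simp only [show pvGFstr.length = 9 from rfl, List.length_take, List.length_cons,
          show min 9 (rest.length + 1) = 9 by omega, Nat.sub_self,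
          List.replicate_zero, List.nil_append]
        exact congrArg pvStrip hzip
      have hzlen : (List.zipWith pvXorChar (rest.take 8) (pvGFstr.tail)).length = 8 := by
        simp [List.length_zipWith, show pvGFstr.tail.length = 8 from rfl]
        omega
      have hr0 : r0 = '0' ∨ r0 = '1' := hbin r0 List.mem_cons_self
      rcases hr0 with hr0 | hr0
      · -- leading '0': left keeps length 9 and starts with '1'; length unchanged
        have hx0 : pvXorChar r0 '1' = '1' := by rw [hr0]; rfl
        have hleft : pvAdd ((r0 :: rest).take 9) pvGFstr
            = '1' :: List.zipWith pvXorChar (rest.take 8) (pvGFstr.tail) := by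
          rw [hadd, hx0, pvStrip]
          simp
        have hlen' : result'.length = rest.length + 1 := by
          rw [hres', List.length_append, hleft]
          simp [hzlen]
          omega
        have hhead' : result'.head? = some '1' := by
          rw [hres', hleft]; rfl
        have hm' : 2 * result'.length + (if result'.head? = some '1' then 0 else 1) < fuel := by
          rw [hhead', if_pos rfl, hlen']
          rw [hlen, hr0] at hm
          simp [show (('0' : Char) :: rest).head? = some '0' from rfl] at hm
          omega
        obtain ⟨ihb, ihv⟩ := ih result' hbin' hm'
        refine ⟨ihb, ?_⟩
        rw [ihv, hval',
          show (r0 :: rest).length - 9 = rest.length - 8 by rw [hlen]; omega]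
        -- reduceGo ((v ^^^ q)) = reduceGo v with v < 2^n, q = 283·2^(n-8)
        have hv : pvV (r0 :: rest) = pvV rest := by
          rw [hr0, pvV_cons, show pvBitc '0' = 0 from rfl]; ring
        have hn : rest.length - 8 + 8 = rest.length := by omega
        obtain ⟨hq1, hq2⟩ := pvQbounds (rest.length - 8)
        rw [hn] at hq1
        rw [show rest.length - 8 + 9 = rest.length + 1 by omega] at hq2
        have hvlt : pvV rest < 2 ^ rest.length := pvV_lt rest
        set q := 283 * 2 ^ (rest.length - 8) with hqdef
        have hsplit : q ^^^ pvV rest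
            = 2 ^ rest.length + ((q - 2 ^ rest.length) ^^^ pvV rest) := by
          have := pvHLxor 1 0 (q - 2 ^ rest.length) (pvV rest) rest.length (by omega) hvlt
          simp only [one_mul, zero_mul, zero_add] at this
          rw [show 2 ^ rest.length + (q - 2 ^ rest.length) = q by omega] at this
          rw [this]
          simp
        have hxlt : (q - 2 ^ rest.length) ^^^ pvV rest < 2 ^ rest.length :=
          Nat.xor_lt_two_pow (by omega) hvlt
        have hbl : pvBitLen (pvV (r0 :: rest) ^^^ q) = rest.length + 1 := by
          rw [hv, Nat.xor_comm, hsplit]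
          exact pvBitLen_eq_of (by omega) (by rw [pow_succ]; omega)
        conv_lhs => rw [pvReduceGo]
        rw [dif_pos (by rw [hbl]; omega), hbl,
          show rest.length + 1 - 9 = rest.length - 8 by omega,
          Nat.shiftLeft_eq, ← hqdef, Nat.xor_xor_cancel_right]
      · -- leading '1': the left block shrinks, plain one-step reduction
        have hx0 : pvXorChar r0 '1' = '0' := by rw [hr0]; rfl
        have hleft : pvAdd ((r0 :: rest).take 9) pvGFstr
            = pvStrip (List.zipWith pvXorChar (rest.take 8) (pvGFstr.tail)) := by
          rw [hadd, hx0, pvStrip]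
          simp
        have hlen' : result'.length ≤ rest.length := by
          rw [hres', List.length_append, hleft]
          have h1 := pvStrip_len (List.zipWith pvXorChar (rest.take 8) (pvGFstr.tail))
          rw [hzlen] at h1
          simp only [List.length_drop, hlen]
          omega
        have hm' : 2 * result'.length + (if result'.head? = some '1' then 0 else 1) < fuel := by
          rw [hlen, hr0] at hm
          simp [show (('1' : Char) :: rest).head? = some '1' from rfl] at hm
          split <;> omega
        obtain ⟨ihb, ihv⟩ := ih result' hbin' hm'
        refine ⟨ihb, ?_⟩
        rw [ihv, hval',
          show (r0 :: rest).length - 9 = rest.length - 8 by rw [hlen]; omega]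
        obtain ⟨hq1, hq2⟩ := pvQbounds (rest.length - 8)
        rw [show rest.length - 8 + 8 = rest.length by omega] at hq1
        rw [show rest.length - 8 + 9 = rest.length + 1 by omega] at hq2
        have hvge : 2 ^ rest.length ≤ pvV (r0 :: rest) := by
          rw [hr0, pvV_cons, show pvBitc '1' = 1 from rfl]; omega
        have hvlt : pvV (r0 :: rest) < 2 ^ (rest.length + 1) := by
          have := pvV_lt (r0 :: rest)
          rwa [hlen] at this
        have hbl : pvBitLen (pvV (r0 :: rest)) = rest.length + 1 :=
          pvBitLen_eq_of hvge hvlt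
        conv_rhs => rw [pvReduceGo]
        rw [dif_pos (by rw [hbl]; omega), hbl,
          show rest.length + 1 - 9 = rest.length - 8 by omega,
          Nat.shiftLeft_eq]

theorem pvMod_spec {A : List Char} (hA : pvIsBin A) :
    pvIsBin (pvMod A pvGFstr) ∧ pvV (pvMod A pvGFstr) = pvReduceGo (pvV A) := by
  unfold pvMod
  exact pvModGo_spec _ A hA (by split <;> omega)

-- ===== bridging pvReduceGo/pvClmul to B's fused Horner scan =====

theorem pvReduceGo_small {x : Nat} (h : x < 256) : pvReduceGo x = x := by
  rw [pvReduceGo, dif_neg]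
  intro hc
  have h8 : pvBitLen x ≤ 8 := pvBitLen_le_iff.2 (by norm_num; omega)
  omega

-- xor with a low (< 2^8) value commutes with the long-division reduction
theorem pvReduceGo_xor_small : ∀ x e, e < 256 → pvReduceGo (x ^^^ e) = pvReduceGo x ^^^ e := by
  intro x
  induction x using Nat.strong_induction_on with
  | _ x ih =>
    intro e he
    by_cases h9 : 9 ≤ pvBitLen x
    · -- split x = hi*2^8 + lo, hi ≠ 0
      have hx0 : x ≠ 0 := by rintro rfl; simp [pvBitLen] at h9
      obtain ⟨hb1, hb2⟩ := pvBitLen_bounds hx0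
      set L := pvBitLen x with hL
      have hsplit : x ^^^ e = x / 2 ^ 8 * 2 ^ 8 + (x % 2 ^ 8 ^^^ e) := by
        have hh := pvHLxor (x / 2 ^ 8) 0 (x % 2 ^ 8) e 8 (Nat.mod_lt _ (by norm_num)) he
        simp only [zero_mul, zero_add, Nat.xor_zero] at hh
        rwa [Nat.div_add_mod'] at hh
      have hbl : pvBitLen (x ^^^ e) = L := by
        have hdge : 2 ^ (L - 9) ≤ x / 2 ^ 8 := by
          rw [Nat.le_div_iff_mul_le (by norm_num), ← pow_add]
          calc 2 ^ (L - 9 + 8) ≤ 2 ^ (L - 1) :=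
                Nat.pow_le_pow_right Nat.zero_lt_two (by omega)
          _ ≤ x := hb1
        have hdlt : x / 2 ^ 8 < 2 ^ (L - 8) := by
          rw [Nat.div_lt_iff_lt_mul (by norm_num), ← pow_add]
          exact lt_of_lt_of_le hb2 (Nat.pow_le_pow_right Nat.zero_lt_two (by omega))
        rw [hsplit, show L = (L - 1) + 1 by omega]
        apply pvBitLen_eq_of
        · calc 2 ^ (L - 1) = 2 ^ (L - 9) * 2 ^ 8 := by rw [← pow_add]; congr 1; omega
          _ ≤ x / 2 ^ 8 * 2 ^ 8 := Nat.mul_le_mul_right _ hdge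
          _ ≤ _ := Nat.le_add_right _ _
        · rw [show L - 1 + 1 = L by omega]
          have hlow : x % 2 ^ 8 ^^^ e < 2 ^ 8 :=
            Nat.xor_lt_two_pow (Nat.mod_lt _ (by norm_num)) he
          calc x / 2 ^ 8 * 2 ^ 8 + (x % 2 ^ 8 ^^^ e)
              < x / 2 ^ 8 * 2 ^ 8 + 2 ^ 8 := by omega
          _ ≤ 2 ^ (L - 8) * 2 ^ 8 := by
                have : x / 2 ^ 8 + 1 ≤ 2 ^ (L - 8) := hdlt
                nlinarith
          _ = 2 ^ L := by rw [← pow_add]; congr 1; omega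
      conv_lhs => rw [pvReduceGo]
      rw [dif_pos (by rw [hbl]; omega)]
      conv_rhs => rw [pvReduceGo, dif_pos h9]
      have hstep : x ^^^ e ^^^ 283 <<< (pvBitLen (x ^^^ e) - 9)
          = (x ^^^ 283 <<< (L - 9)) ^^^ e := by
        rw [hbl, Nat.xor_assoc, Nat.xor_comm e, ← Nat.xor_assoc]
      rw [hstep]
      exact ih _ (pvReduce_dec h9) e he
    · have hxlt : x < 256 := by
        have : pvBitLen x ≤ 8 := by omega
        exact lt_of_lt_of_le (pvBitLen_le_iff.1 this) (by norm_num)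
      have hlt : x ^^^ e < 256 := by
        have := Nat.xor_lt_two_pow (show x < 2 ^ 8 by omega) (show e < 2 ^ 8 by omega)
        omega
      rw [pvReduceGo_small hlt, pvReduceGo_small hxlt]

theorem pvBitLen_double {x : Nat} (h : x ≠ 0) : pvBitLen (2 * x) = pvBitLen x + 1 := by
  obtain ⟨h1, h2⟩ := pvBitLen_bounds h
  have hL : 1 ≤ pvBitLen x := by
    by_contra hc
    exact h (by simpa using pvBitLen_le_iff.1 (show pvBitLen x ≤ 0 by omega))
  apply pvBitLen_eq_of
  · calc 2 ^ pvBitLen x = 2 * 2 ^ (pvBitLen x - 1) := by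
          rw [← pow_succ']; congr 1; omega
    _ ≤ 2 * x := by omega
  · rw [pow_succ]
    omega

-- doubling commutes with the long-division reduction, up to one fused xtime step
theorem pvReduceGo_double : ∀ x, pvReduceGo (2 * x) = pvXtime (pvReduceGo x) := by
  intro x
  induction x using Nat.strong_induction_on with
  | _ x ih =>
    by_cases h9 : 9 ≤ pvBitLen x
    · have hx0 : x ≠ 0 := by rintro rfl; simp [pvBitLen] at h9
      have hbl2 : pvBitLen (2 * x) = pvBitLen x + 1 := pvBitLen_double hx0
      conv_lhs => rw [pvReduceGo]
      rw [dif_pos (by omega), hbl2,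
        show pvBitLen x + 1 - 9 = pvBitLen x - 9 + 1 by omega]
      have hsh : (283 : Nat) <<< (pvBitLen x - 9 + 1) = 2 * (283 <<< (pvBitLen x - 9)) := by
        rw [Nat.shiftLeft_eq, Nat.shiftLeft_eq, pow_succ]
        ring
      have hmx : 2 * x ^^^ 2 * (283 <<< (pvBitLen x - 9)) = 2 * (x ^^^ 283 <<< (pvBitLen x - 9)) := by
        have h2 : ∀ a : Nat, 2 * a = a <<< 1 := fun a => by
          rw [Nat.shiftLeft_eq, pow_one, mul_comm]
        rw [h2, h2, h2, ← Nat.shiftLeft_xor_distrib]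
      rw [hsh, hmx, ih _ (pvReduce_dec h9)]
      conv_rhs => rw [pvReduceGo, dif_pos h9]
    · have hxlt : x < 256 := by
        have : pvBitLen x ≤ 8 := by omega
        exact lt_of_lt_of_le (pvBitLen_le_iff.1 this) (by norm_num)
      rw [pvReduceGo_small hxlt]
      unfold pvXtime
      simp only [Nat.shiftLeft_eq, pow_one]
      by_cases hhi : x < 128
      · have hlt : 2 * x < 256 := by omega
        rw [pvReduceGo_small (by omega)]
        have h0 : x * 2 &&& 256 = 0 := by
          rw [show (256:Nat) = 2 ^ 8 from rfl, Nat.and_two_pow,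
            Nat.testBit_lt_two_pow (show x * 2 < 2 ^ 8 by norm_num; omega)]
          rfl
        simp [h0, mul_comm]
      · -- 128 ≤ x < 256: one reduction step
        have hge : 256 ≤ 2 * x := by omega
        have hlt : 2 * x < 512 := by omega
        have hbl : pvBitLen (2 * x) = 9 :=
          pvBitLen_eq_of (by norm_num; omega) (by norm_num; omega)
        conv_lhs => rw [pvReduceGo]
        rw [dif_pos (by omega), hbl]
        simp only [Nat.sub_self, Nat.shiftLeft_zero]
        have hred : 2 * x ^^^ 283 < 256 := by
          have := pvXorTop (m := 8) (x := 2 * x) (y := 283) (by norm_num; omega)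
            (by norm_num; omega) (by norm_num) (by norm_num)
          simpa using this
        rw [pvReduceGo_small hred]
        have htb : x * 2 &&& 256 ≠ 0 := by
          rw [show (256:Nat) = 2 ^ 8 from rfl, Nat.and_two_pow,
            tb_high (m := 8) (show 2 ^ 8 ≤ x * 2 by norm_num; omega)
              (show x * 2 < 2 ^ (8 + 1) by norm_num; omega)]
          norm_num
        simp [htb, mul_comm]

theorem pvClmul_double : ∀ b a, pvClmul (2 * a) b = 2 * pvClmul a b := by
  intro b
  induction b using Nat.strong_induction_on with
  | _ b ih =>
    intro a
    by_cases hb : b = 0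
    · subst hb; simp [pvClmul]
    · rw [pvClmul, if_neg hb]
      conv_rhs => rw [pvClmul, if_neg hb]
      rw [ih (b / 2) (by omega) (2 * a)]
      have h2 : ∀ u v : Nat, 2 * (u ^^^ v) = 2 * u ^^^ 2 * v := by
        intro u v
        have hs : ∀ a : Nat, 2 * a = a <<< 1 := fun a => by
          rw [Nat.shiftLeft_eq, pow_one, mul_comm]
        rw [hs, hs, hs, ← Nat.shiftLeft_xor_distrib]
      rw [h2]
      congr 1
      split <;> simp

-- the heart of the equivalence: multiply-then-reduce = fused Horner scan
theorem pvMulStr_eq (c : Nat) (hc : c < 256) :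
    ∀ s : List Char, pvMulStr c s = pvReduceGo (pvClmul c (pvV s)) := by
  intro s
  induction s using List.reverseRecOn with
  | nil =>
    rw [show pvV [] = 0 from rfl, pvClmul, if_pos rfl, pvReduceGo_small (by norm_num)]
    rfl
  | append_singleton t ch ih =>
    have hfold : pvMulStr c (t ++ [ch])
        = (let u := pvXtime (pvMulStr c t); if ch = '1' then u ^^^ c else u) := by
      unfold pvMulStr
      rw [List.foldl_append]
      rfl
    rw [hfold, ih]
    have hv : pvV (t ++ [ch]) = pvBitc ch + 2 * pvV t := by
      rw [pvV_append]
      simp [pvV_cons, pvV]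
      ring
    rw [hv, pvClmul_bit, pvClmul_double]
    set e : Nat := if ch = '1' then c else 0 with he
    have helt : e < 256 := by rw [he]; split <;> omega
    rw [Nat.xor_comm e, pvReduceGo_xor_small _ e helt, pvReduceGo_double]
    by_cases hch : ch = '1'
    · simp [he, hch]
    · simp [he, hch]

theorem pvTerm (M s : List Char) (n : Nat) (hM : pvIsBin M) (hn : pvV M = n) (hlt : n < 256) :
    pvIsBin (pvMod (pvMultiply M s) pvGFstr) ∧
    pvV (pvMod (pvMultiply M s) pvGFstr) = pvMulStr n s := by
  obtain ⟨hcan, hv⟩ := pvMultiply_spec s hM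
  obtain ⟨hb2, hv2⟩ := pvMod_spec (pvCanon_bin hcan)
  refine ⟨hb2, ?_⟩
  rw [hv2, hv, hn, pvMulStr_eq n hlt]

theorem pvRow_eq (M0 M1 M2 M3 : List Char) (n0 n1 n2 n3 : Nat)
    (h0 : pvIsBin M0 ∧ pvV M0 = n0 ∧ n0 < 256) (h1 : pvIsBin M1 ∧ pvV M1 = n1 ∧ n1 < 256)
    (h2 : pvIsBin M2 ∧ pvV M2 = n2 ∧ n2 < 256) (h3 : pvIsBin M3 ∧ pvV M3 = n3 ∧ n3 < 256)
    (s0 s1 s2 s3 : List Char) :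
    pvAdd (pvAdd (pvAdd (pvAdd ['0','0','0','0','0','0','0','0']
        (pvMod (pvMultiply M0 s0) pvGFstr))
        (pvMod (pvMultiply M1 s1) pvGFstr))
        (pvMod (pvMultiply M2 s2) pvGFstr))
        (pvMod (pvMultiply M3 s3) pvGFstr)
      = pvToBin (((pvMulStr n0 s0 ^^^ pvMulStr n1 s1)
          ^^^ pvMulStr n2 s2) ^^^ pvMulStr n3 s3) := by
  obtain ⟨b0, v0⟩ := pvTerm M0 s0 n0 h0.1 h0.2.1 h0.2.2
  obtain ⟨b1, v1⟩ := pvTerm M1 s1 n1 h1.1 h1.2.1 h1.2.2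
  obtain ⟨b2, v2⟩ := pvTerm M2 s2 n2 h2.1 h2.2.1 h2.2.2
  obtain ⟨b3, v3⟩ := pvTerm M3 s3 n3 h3.1 h3.2.1 h3.2.2
  have h8bin : pvIsBin ['0','0','0','0','0','0','0','0'] := by
    intro c hc; fin_cases hc <;> simp
  have c1 := pvAdd_canon h8bin b0
  have c2 := pvAdd_canon (pvCanon_bin c1) b1
  have c3 := pvAdd_canon (pvCanon_bin c2) b2
  have c4 := pvAdd_canon (pvCanon_bin c3) b3
  have hval : pvV (pvAdd (pvAdd (pvAdd (pvAdd ['0','0','0','0','0','0','0','0']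
      (pvMod (pvMultiply M0 s0) pvGFstr)) (pvMod (pvMultiply M1 s1) pvGFstr))
      (pvMod (pvMultiply M2 s2) pvGFstr)) (pvMod (pvMultiply M3 s3) pvGFstr))
      = ((pvMulStr n0 s0 ^^^ pvMulStr n1 s1)
          ^^^ pvMulStr n2 s2) ^^^ pvMulStr n3 s3 := by
    rw [pvAdd_v (pvCanon_bin c3) b3, pvAdd_v (pvCanon_bin c2) b2,
      pvAdd_v (pvCanon_bin c1) b1, pvAdd_v h8bin b0,
      show pvV ['0','0','0','0','0','0','0','0'] = 0 from rfl, v0, v1, v2, v3,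
      Nat.zero_xor]
  rw [← hval, pvCanon_toBin c4]

theorem pvConstE : pvIsBin ['0','0','0','0','1','1','1','0'] ∧ pvV ['0','0','0','0','1','1','1','0'] = 14 ∧ (14:Nat) < 256 :=
  ⟨by intro c hc; fin_cases hc <;> simp, rfl, by norm_num⟩
theorem pvConstB : pvIsBin ['0','0','0','0','1','0','1','1'] ∧ pvV ['0','0','0','0','1','0','1','1'] = 11 ∧ (11:Nat) < 256 :=
  ⟨by intro c hc; fin_cases hc <;> simp, rfl, by norm_num⟩
theorem pvConstD : pvIsBin ['0','0','0','0','1','1','0','1'] ∧ pvV ['0','0','0','0','1','1','0','1'] = 13 ∧ (13:Nat) < 256 :=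
  ⟨by intro c hc; fin_cases hc <;> simp, rfl, by norm_num⟩
theorem pvConstN : pvIsBin ['0','0','0','0','1','0','0','1'] ∧ pvV ['0','0','0','0','1','0','0','1'] = 9 ∧ (9:Nat) < 256 :=
  ⟨by intro c hc; fin_cases hc <;> simp, rfl, by norm_num⟩

-- ===== VERDICT (by name: the statement is the Claim_ definition above) =====
theorem inverse_matrix_multiplication_spec : Claim_equal_inverse_matrix_multiplication := by
  intro column _ hpre
  unfold Spec_inverse_matrix_multiplication
  match column, hpre with
  | s0 :: s1 :: s2 :: s3 :: rest, _ =>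
    unfold inverse_matrix_multiplication inverse_matrix_multiplication_alt
    simp only [pvMATRIXstr, pvMATRIXn, show List.range 4 = [0,1,2,3] from rfl,
      List.foldl_cons, List.foldl_nil,
      List.zip_cons_cons, List.zip_nil_left,
      List.getD_cons_zero, List.getD_cons_succ,
      List.nil_append, List.cons_append, Nat.zero_xor]
    norm_num
    refine ⟨?_, ?_, ?_, ?_⟩
    · exact congrArg String.mk
        (pvRow_eq _ _ _ _ 14 11 13 9 pvConstE pvConstB pvConstD pvConstN _ _ _ _)
    · exact congrArg String.mk
        (pvRow_eq _ _ _ _ 9 14 11 13 pvConstN pvConstE pvConstB pvConstD _ _ _ _)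
    · exact congrArg String.mk
        (pvRow_eq _ _ _ _ 13 9 14 11 pvConstD pvConstN pvConstE pvConstB _ _ _ _)
    · exact congrArg String.mk
        (pvRow_eq _ _ _ _ 11 13 9 14 pvConstB pvConstD pvConstN pvConstE _ _ _ _)
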